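-- pv_equiv track=rewrite | github.com/geckmf/PyCox | coxeter.py | cartanmatA
-- ===== SOURCE A (Python) =====
-- def cartanmatA(n):
--     """
--     Cartan matrix of type A as a list of lists.
--
--     >>> cartanmatA(2)
--     [[2, -1], [-1, 2]]
--     """
--     if n == 0:
--         return [[]]
--     a = [[2 if i == j else 0 for i in range(n)] for j in range(n)]
--     for i in range(n - 1):
--         a[i][i + 1] = -1
--         a[i + 1][i] = -1
--     return a
-- ===== SOURCE B (Python) =====
-- def cartanmatA(n):
--     if n == 0:
--         return [[]]
--     big = [0] * (n - 1) + [-1, 2, -1] + [0] * (n - 1)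
--     return [big[n - j : 2 * n - j] for j in range(n)]
-- ===== Notes on version B (the rewrite author's own statement) =====
-- stated objective: alternative
-- what changed: Replaces the build-diagonal-then-patch mutation strategy with a sliding-window stencil: one padded list [0]*(n-1)+[-1,2,-1]+[0]*(n-1) is built once and every row is a slice (shifted window) of it.
import Mathlib
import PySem

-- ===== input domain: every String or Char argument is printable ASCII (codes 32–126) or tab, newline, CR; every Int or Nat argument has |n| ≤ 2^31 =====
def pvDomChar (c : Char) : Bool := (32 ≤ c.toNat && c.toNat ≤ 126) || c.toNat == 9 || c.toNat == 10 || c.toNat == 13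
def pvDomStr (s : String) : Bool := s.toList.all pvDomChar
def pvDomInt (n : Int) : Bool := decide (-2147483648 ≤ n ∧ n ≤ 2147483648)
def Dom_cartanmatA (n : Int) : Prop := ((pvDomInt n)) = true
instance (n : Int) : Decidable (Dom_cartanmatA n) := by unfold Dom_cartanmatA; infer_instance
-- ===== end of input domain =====

-- B replaces A's build-diagonal-then-patch strategy with a sliding-window stencil:
-- one padded list is built once and every row is a slice (shifted window) of it (objective: alternative).

-- ===== PORT A =====
-- the body of A's for-loop: a[i][i+1] = -1; a[i+1][i] = -1  (indices are in range for n ≥ 1)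
def cartanPatch (a : List (List Int)) (i : Int) : List (List Int) :=
  let a1 := PySem.List.pySetD a i (PySem.List.pySetD (PySem.List.pyGetD a i []) (i + 1) (-1))
  PySem.List.pySetD a1 (i + 1) (PySem.List.pySetD (PySem.List.pyGetD a1 (i + 1) []) i (-1))

def cartanmatA (n : Int) : List (List Int) :=
  if n = 0 then [[]]
  else
    let a := (PySem.List.pyRange 0 n).map
      (fun j => (PySem.List.pyRange 0 n).map (fun i => if i = j then 2 else 0))
    (PySem.List.pyRange 0 (n - 1)).foldl cartanPatch a

-- ===== PORT B =====
-- [0]*(n-1) in Python is [] for n ≤ 1; List.replicate (n-1).toNat matches that exactly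
def cartanmatA_alt (n : Int) : List (List Int) :=
  if n = 0 then [[]]
  else
    let big := List.replicate (n - 1).toNat (0 : Int) ++ [-1, 2, -1] ++ List.replicate (n - 1).toNat (0 : Int)
    (PySem.List.pyRange 0 n).map (fun j => PySem.List.slice big (some (n - j)) (some (2 * n - j)))

-- ===== PRECONDITION & SPEC =====
def Spec_cartanmatA (n : Int) (out : List (List Int)) : Prop := out = cartanmatA_alt n
instance (n : Int) (out : List (List Int)) : Decidable (Spec_cartanmatA n out) := by unfold Spec_cartanmatA; infer_instance

-- ===== CLAIM (what is proved, stated in full; the proofs are below) =====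
def Claim_equal_cartanmatA : Prop := ∀ (n : Int), Dom_cartanmatA n → Spec_cartanmatA n (cartanmatA n)

-- ===== LEMMAS AND PROOFS =====

-- entry of the intermediate matrix after the first k iterations of A's patch loop
def pvEnt (k j i : Nat) : Int :=
  if i = j then 2 else if (i + 1 = j ∨ j + 1 = i) ∧ min i j < k then -1 else 0

-- the intermediate matrix itself (m×m, k iterations done)
def pvMat (m k : Nat) : List (List Int) :=
  (List.range m).map (fun j => (List.range m).map (fun i => pvEnt k j i))

theorem pvRow (m k j : Nat) (hj : j < m) :
    PySem.List.pyGetD (pvMat m k) (j : Int) [] = (List.range m).map (fun i => pvEnt k j i) := by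
  simp [pvMat, PySem.List.pyGetD_natCast, List.getD_eq_getElem?_getD, hj]

theorem pvPatch_step (m k : Nat) (hk : k + 1 < m) :
    cartanPatch (pvMat m k) (k : Int) = pvMat m (k + 1) := by
  have hkm : k < m := by omega
  have e1 : ((k : Int) + 1) = ((k + 1 : Nat) : Int) := by push_cast; ring
  unfold cartanPatch
  rw [pvRow m k k hkm, e1]
  simp only [PySem.List.pySetD_natCast, PySem.List.pyGetD_natCast]
  rw [List.getD_eq_getElem _ _ (by simp [pvMat]; omega),
      List.getElem_set_ne (by omega)]
  simp only [pvMat, List.getElem_map, List.getElem_range]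
  apply List.ext_getElem
  · simp
  intro j h1 h2
  have hjm : j < m := by simpa [pvMat] using h2
  rcases Nat.lt_trichotomy j k with hj | hj | hj
  · rw [List.getElem_set_ne (by omega), List.getElem_set_ne (by omega)]
    simp only [List.getElem_map, List.getElem_range]
    apply List.map_congr_left
    intro i hi
    have him : i < m := List.mem_range.mp hi
    simp only [pvEnt]
    by_cases hij : i = j
    · simp [hij]
    · simp only [hij, if_false]
      have : ((i + 1 = j ∨ j + 1 = i) ∧ min i j < k) ↔ ((i + 1 = j ∨ j + 1 = i) ∧ min i j < k + 1) := by
        omega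
      rw [if_congr this rfl rfl]
  · subst hj
    rw [List.getElem_set_ne (by omega), List.getElem_set_self (by simp; omega)]
    simp only [List.getElem_map, List.getElem_range]
    apply List.ext_getElem
    · simp
    intro i hi1 hi2
    have him : i < m := by simpa using hi2
    rw [List.getElem_set]
    simp only [List.getElem_map, List.getElem_range, pvEnt]
    split_ifs with h <;> omega
  · by_cases hj1 : j = k + 1
    · subst hj1
      rw [List.getElem_set_self (by simp; omega)]
      simp only [List.getElem_map, List.getElem_range]
      apply List.ext_getElem
      · simp
      intro i hi1 hi2
      have him : i < m := by simpa using hi2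
      rw [List.getElem_set]
      simp only [List.getElem_map, List.getElem_range, pvEnt]
      split_ifs with h <;> omega
    · rw [List.getElem_set_ne (by omega), List.getElem_set_ne (by omega)]
      simp only [List.getElem_map, List.getElem_range]
      apply List.map_congr_left
      intro i hi
      simp only [pvEnt]
      by_cases hij : i = j
      · simp [hij]
      · simp only [hij, if_false]
        have : ((i + 1 = j ∨ j + 1 = i) ∧ min i j < k) ↔ ((i + 1 = j ∨ j + 1 = i) ∧ min i j < k + 1) := by
          omega
        rw [if_congr this rfl rfl]

theorem pvLoop (m k : Nat) (hk : k ≤ m - 1) (hm : 1 ≤ m) :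
    (PySem.List.pyRange 0 (k : Int)).foldl cartanPatch (pvMat m 0) = pvMat m k := by
  induction k with
  | zero => simp [PySem.List.pyRange_one_eq_nil]
  | succ k ih =>
    rw [show ((k + 1 : Nat) : Int) = (k : Int) + 1 by push_cast; ring,
        PySem.List.pyRange_one_succ_right (by positivity), List.foldl_append]
    rw [ih (by omega)]
    simpa using pvPatch_step m k (by omega)

-- the initial comprehension of A is pvMat m 0
theorem pvInit (m : Nat) :
    ((PySem.List.pyRange 0 (m : Int)).map
      (fun j => (PySem.List.pyRange 0 (m : Int)).map (fun i => if i = j then 2 else (0:Int)))) =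
    pvMat m 0 := by
  rw [PySem.List.pyRange_zero_natCast]
  simp only [List.map_map, pvMat]
  apply List.map_congr_left
  intro j _
  apply List.map_congr_left
  intro i _
  simp only [pvEnt]
  split_ifs with h <;> simp_all

-- entry p of B's padded stencil list (m ≥ 1, p < 2m+1)
theorem pvBigGet (m p : Nat) (hm : 1 ≤ m) (hplen : p < (m - 1) + 3 + (m - 1))
    (h : p < (List.replicate (m - 1) (0 : Int) ++ [-1, 2, -1] ++ List.replicate (m - 1) (0 : Int)).length) :
    (List.replicate (m - 1) (0 : Int) ++ [-1, 2, -1] ++ List.replicate (m - 1) (0 : Int))[p] =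
    if p = m then 2 else if p + 1 = m ∨ p = m + 1 then -1 else 0 := by
  rcases Nat.lt_or_ge p (m - 1) with hp | hp
  · rw [List.getElem_append_left (by simp; omega), List.getElem_append_left (by simp; omega)]
    simp only [List.getElem_replicate]
    split_ifs with h1 h2 <;> omega
  · rcases Nat.lt_or_ge p (m + 2) with hp2 | hp2
    · rw [List.getElem_append_left (by simp; omega), List.getElem_append_right (by simp; omega)]
      simp only [List.length_replicate]
      have : p - (m - 1) = 0 ∨ p - (m - 1) = 1 ∨ p - (m - 1) = 2 := by omega
      rcases this with h0 | h0 | h0 <;> simp only [h0] <;>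
        · simp only [List.getElem_cons_zero, List.getElem_cons_succ] <;> split_ifs <;> omega
    · rw [List.getElem_append_right (by simp; omega)]
      simp only [List.getElem_replicate]
      split_ifs with h1 h2 <;> omega

-- row j of B: the window of the stencil equals row j of the fully-patched matrix
theorem pvAltRow (m j : Nat) (hm : 1 ≤ m) (hj : j < m) :
    PySem.List.slice
      (List.replicate (m - 1) (0 : Int) ++ [-1, 2, -1] ++ List.replicate (m - 1) (0 : Int))
      (some ((m : Int) - (j : Int))) (some (2 * (m : Int) - (j : Int))) =
    (List.range m).map (fun i => pvEnt (m - 1) j i) := by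
  have e1 : (m : Int) - (j : Int) = ((m - j : Nat) : Int) := by omega
  have e2 : 2 * (m : Int) - (j : Int) = ((m - j : Nat) : Int) + ((m : Nat) : Int) := by omega
  rw [e1, e2, PySem.List.slice_natCast_add]
  apply List.ext_getElem
  · simp; omega
  intro i h1 h2
  have him : i < m := by simpa using h2
  rw [List.getElem_take, List.getElem_drop]
  have hp : (m - j) + i < (m - 1) + 3 + (m - 1) := by omega
  rw [pvBigGet m ((m - j) + i) hm hp]
  simp only [List.getElem_map, List.getElem_range, pvEnt]
  split_ifs with a1 a2 a3 a4 <;> omega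

-- ===== VERDICT (by name: the statement is the Claim_ definition above) =====
theorem cartanmatA_spec : Claim_equal_cartanmatA := by
  intro n _
  unfold Spec_cartanmatA cartanmatA cartanmatA_alt
  by_cases h0 : n = 0
  · simp [h0]
  simp only [h0, if_false]
  rcases lt_or_gt_of_ne h0 with hneg | hpos
  · rw [PySem.List.pyRange_one_eq_nil (by omega), PySem.List.pyRange_one_eq_nil (by omega)]
    simp
  · set m := n.toNat with hm
    have hn : n = (m : Int) := by omega
    have hm1 : 1 ≤ m := by omega
    rw [hn, pvInit m,
        show ((m : Int) - 1) = ((m - 1 : Nat) : Int) by omega,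
        pvLoop m (m - 1) (le_refl _) hm1]
    simp only [Int.toNat_natCast]
    rw [PySem.List.pyRange_zero_natCast, List.map_map, pvMat]
    apply List.map_congr_left
    intro j hj
    have hjm : j < m := List.mem_range.mp hj
    exact (pvAltRow m j hm1 hjm).symm
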